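-- pv_equiv track=rewrite | github.com/12bitsD/JungleGame | model/move.py | _get_jump_path_squares
-- ===== SOURCE A (Python) =====
-- def _get_jump_path_squares(from_row: int, from_col: int,
--                            to_row: int, to_col: int) -> list:
--     """Get the water squares in jump path."""
--     squares = []
--
--     if from_row == to_row:  # Horizontal jump
--         min_col = min(from_col, to_col)
--         max_col = max(from_col, to_col)
--         for col in range(min_col + 1, max_col):
--             squares.append((from_row, col))
--     else:  # Vertical jump
--         min_row = min(from_row, to_row)
--         max_row = max(from_row, to_row)
--         for row in range(min_row + 1, max_row):
--             squares.append((row, from_col))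
--
--     # Validate this is a river crossing (should be exactly 3 water squares)
--     if len(squares) != 3:
--         return []
--
--     return squares
-- ===== SOURCE B (Python) =====
-- def _get_jump_path_squares(from_row: int, from_col: int,
--                            to_row: int, to_col: int) -> list:
--     """Get the water squares in jump path.
--
--     Direction-vector walk: normalise the endpoints so we always walk from the
--     lexicographically smaller square toward the larger one, step by the unit
--     direction vector, and collect the squares strictly between them.
--     """
--     a, b = (from_row, from_col), (to_row, to_col)
--     if a > b:
--         a, b = b, a
--     dr = (b[0] > a[0]) - (b[0] < a[0])
--     dc = (b[1] > a[1]) - (b[1] < a[1])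
--     if dr != 0 and dc != 0:
--         return []  # diagonal pair: a jump is axis-aligned, no crossing path
--     path = []
--     r, c = a[0] + dr, a[1] + dc
--     while (r, c) != b:
--         path.append((r, c))
--         r += dr
--         c += dc
--     return path if len(path) == 3 else []
-- ===== Notes on version B (the rewrite author's own statement) =====
-- stated objective: alternative
-- what changed: Replaces the orientation branch with min/max bounds, per-orientation range loops and a post-hoc length check by endpoint normalisation (swap to the lexicographically smaller square) and a single unit-direction-vector walk collecting the strictly-between squares; non-straight pairs are rejected up front without any loop.
-- intended difference: On diagonal pairs (both row and column change) whose row span is exactly 4, A returns the three vertical in-between squares at from_col as if the jump were straight, while B returns []; a jump in this game is axis-aligned, so a diagonal pair has no water-crossing path and [] is the intended value. — e.g. on _get_jump_path_squares(0, 0, 4, 1): A returns [(1, 0), (2, 0), (3, 0)], B returns []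
import Mathlib
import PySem

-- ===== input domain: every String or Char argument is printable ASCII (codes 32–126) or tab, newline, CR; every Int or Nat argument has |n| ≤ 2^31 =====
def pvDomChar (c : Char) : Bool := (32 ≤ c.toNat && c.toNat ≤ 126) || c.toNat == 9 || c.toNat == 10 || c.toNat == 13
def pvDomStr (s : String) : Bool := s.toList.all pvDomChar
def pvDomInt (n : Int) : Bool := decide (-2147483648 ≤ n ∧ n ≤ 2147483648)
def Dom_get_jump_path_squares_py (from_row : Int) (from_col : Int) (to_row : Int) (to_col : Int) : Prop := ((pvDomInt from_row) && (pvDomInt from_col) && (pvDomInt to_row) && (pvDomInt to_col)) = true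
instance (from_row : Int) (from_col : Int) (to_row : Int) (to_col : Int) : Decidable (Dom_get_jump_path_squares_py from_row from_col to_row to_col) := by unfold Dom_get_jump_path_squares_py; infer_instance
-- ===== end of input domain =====

-- B replaces A's min/max orientation loops + length check by a normalised direction-vector walk; on diagonal pairs with row span 4 (D_) A returns three squares, B returns the intended [].


-- ===== PORT A =====
-- 'for v in range(start, start+fuel): squares.append(f(v))' — array-backed append, like Python's list
def pvJumpLoop (f : Int → Int × Int) (v : Int) (fuel : Nat) (acc : Array (Int × Int)) : Array (Int × Int) :=
  match fuel with
  | 0 => acc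
  | n + 1 => pvJumpLoop f (v + 1) n (acc.push (f v))

def get_jump_path_squares_py (from_row : Int) (from_col : Int) (to_row : Int) (to_col : Int) : List (Int × Int) :=
  let squares : Array (Int × Int) :=
    if from_row == to_row then
      let min_col := min from_col to_col
      let max_col := max from_col to_col
      pvJumpLoop (fun col => (from_row, col)) (min_col + 1) (max_col - (min_col + 1)).toNat #[]
    else
      let min_row := min from_row to_row
      let max_row := max from_row to_row
      pvJumpLoop (fun row => (row, from_col)) (min_row + 1) (max_row - (min_row + 1)).toNat #[]
  if squares.size ≠ 3 then [] else squares.toList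

-- ===== PORT B =====
-- Python int sign: (x > 0) - (x < 0)
def pvSign (x : Int) : Int := (if 0 < x then 1 else 0) - (if x < 0 then 1 else 0)

-- 'while (r, c) != b: path.append((r, c)); r += dr; c += dc' — array-backed append like Python's
-- list; the fuel only bounds the walk (it is enough on every input B walks)
def pvWalk (dr dc br bc : Int) (r c : Int) (fuel : Nat) (path : Array (Int × Int)) : Array (Int × Int) :=
  match fuel with
  | 0 => path
  | n + 1 => if r = br ∧ c = bc then path else pvWalk dr dc br bc (r + dr) (c + dc) n (path.push (r, c))

def get_jump_path_squares_py_alt (from_row : Int) (from_col : Int) (to_row : Int) (to_col : Int) : List (Int × Int) :=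
  -- 'a, b = (from_row, from_col), (to_row, to_col); if a > b: a, b = b, a'  (Python tuple comparison is lexicographic)
  let p := if to_row < from_row ∨ (to_row = from_row ∧ to_col < from_col)
           then ((to_row, to_col), (from_row, from_col))
           else ((from_row, from_col), (to_row, to_col))
  let a := p.1
  let b := p.2
  let dr := pvSign (b.1 - a.1)
  let dc := pvSign (b.2 - a.2)
  if dr ≠ 0 ∧ dc ≠ 0 then []
  else
    let path := (pvWalk dr dc b.1 b.2 (a.1 + dr) (a.2 + dc) ((b.1 - a.1).natAbs + (b.2 - a.2).natAbs) #[]).toList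
    if path.length == 3 then path else []

-- ===== PRECONDITION & SPEC =====
-- On diagonal pairs (both row and column change) whose row span is exactly 4, A returns the three
-- vertical in-between squares at from_col as if the jump were straight, while B returns []; a jump in
-- this game is axis-aligned, so a diagonal pair has no water-crossing path and [] is the intended value.
def D_get_jump_path_squares_py (from_row : Int) (from_col : Int) (to_row : Int) (to_col : Int) : Prop :=
  from_row ≠ to_row ∧ from_col ≠ to_col ∧ (to_row - from_row).natAbs = 4
instance (from_row : Int) (from_col : Int) (to_row : Int) (to_col : Int) : Decidable (D_get_jump_path_squares_py from_row from_col to_row to_col) := by unfold D_get_jump_path_squares_py; infer_instance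

def Spec_get_jump_path_squares_py (from_row : Int) (from_col : Int) (to_row : Int) (to_col : Int) (out : List (Int × Int)) : Prop := ¬ D_get_jump_path_squares_py from_row from_col to_row to_col → out = get_jump_path_squares_py_alt from_row from_col to_row to_col
instance (from_row : Int) (from_col : Int) (to_row : Int) (to_col : Int) (out : List (Int × Int)) : Decidable (Spec_get_jump_path_squares_py from_row from_col to_row to_col out) := by unfold Spec_get_jump_path_squares_py; infer_instance

def pvDiffWitness_get_jump_path_squares_py : Int × Int × Int × Int := (0, 0, 4, 1)
def pvDiffWitnessOut_get_jump_path_squares_py : (List (Int × Int)) × (List (Int × Int)) := ([(1, 0), (2, 0), (3, 0)], [])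

-- ===== CLAIM (what is proved, stated in full; the proofs are below) =====
def Claim_unchanged_get_jump_path_squares_py : Prop := ∀ (from_row : Int) (from_col : Int) (to_row : Int) (to_col : Int), Dom_get_jump_path_squares_py from_row from_col to_row to_col → Spec_get_jump_path_squares_py from_row from_col to_row to_col (get_jump_path_squares_py from_row from_col to_row to_col)
def Claim_changed_get_jump_path_squares_py : Prop := Dom_get_jump_path_squares_py (pvDiffWitness_get_jump_path_squares_py.1) (pvDiffWitness_get_jump_path_squares_py.2.1) (pvDiffWitness_get_jump_path_squares_py.2.2.1) (pvDiffWitness_get_jump_path_squares_py.2.2.2) ∧ D_get_jump_path_squares_py (pvDiffWitness_get_jump_path_squares_py.1) (pvDiffWitness_get_jump_path_squares_py.2.1) (pvDiffWitness_get_jump_path_squares_py.2.2.1) (pvDiffWitness_get_jump_path_squares_py.2.2.2) ∧ get_jump_path_squares_py (pvDiffWitness_get_jump_path_squares_py.1) (pvDiffWitness_get_jump_path_squares_py.2.1) (pvDiffWitness_get_jump_path_squares_py.2.2.1) (pvDiffWitness_get_jump_path_squares_py.2.2.2) = pvDiffWitnessOut_get_jump_path_squares_py.1 ∧ get_jump_path_squares_py_alt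 (pvDiffWitness_get_jump_path_squares_py.1) (pvDiffWitness_get_jump_path_squares_py.2.1) (pvDiffWitness_get_jump_path_squares_py.2.2.1) (pvDiffWitness_get_jump_path_squares_py.2.2.2) = pvDiffWitnessOut_get_jump_path_squares_py.2 ∧ pvDiffWitnessOut_get_jump_path_squares_py.1 ≠ pvDiffWitnessOut_get_jump_path_squares_py.2
def Claim_exact_get_jump_path_squares_py : Prop := ∀ (from_row : Int) (from_col : Int) (to_row : Int) (to_col : Int), Dom_get_jump_path_squares_py from_row from_col to_row to_col → D_get_jump_path_squares_py from_row from_col to_row to_col → get_jump_path_squares_py from_row from_col to_row to_col ≠ get_jump_path_squares_py_alt from_row from_col to_row to_col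

-- ===== LEMMAS AND PROOFS =====

-- A's append loop builds the map of f over the corresponding range.
lemma pvJumpLoop_toList (f : Int → Int × Int) (v : Int) (n : Nat) (acc : Array (Int × Int)) :
    (pvJumpLoop f v n acc).toList
      = acc.toList ++ (PySem.List.pyRange v (v + n) 1).map f := by
  induction n generalizing v acc with
  | zero =>
    rw [pvJumpLoop, PySem.List.pyRange_one_eq_nil (by omega)]
    simp
  | succ n ih =>
    have hr : PySem.List.pyRange v (v + ((n : Int) + 1)) 1
        = v :: PySem.List.pyRange (v + 1) (v + 1 + (n : Int)) 1 := by
      rw [show v + ((n : Int) + 1) = (v + 1) + (n : Int) from by ring,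
          PySem.List.pyRange_one_cons (by omega)]
    rw [pvJumpLoop, ih]
    push_cast
    rw [hr]
    simp

-- A with the fixed coordinate equal: the horizontal branch as a range map plus the length gate.
lemma A_eval_h (r x y : Int) :
    get_jump_path_squares_py r x r y
      = (if ((PySem.List.pyRange (min x y + 1) (max x y) 1).map (fun c => (r, c))).length ≠ 3 then []
         else (PySem.List.pyRange (min x y + 1) (max x y) 1).map (fun c => (r, c))) := by
  have hlist : (pvJumpLoop (fun col => (r, col)) (min x y + 1) (max x y - (min x y + 1)).toNat #[]).toList
      = (PySem.List.pyRange (min x y + 1) (max x y) 1).map (fun c => (r, c)) := by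
    rw [pvJumpLoop_toList]
    by_cases h : max x y ≤ min x y
    · rw [PySem.List.pyRange_one_eq_nil (by omega), PySem.List.pyRange_one_eq_nil (by omega)]
      simp
    · rw [show ((min x y + 1) + (((max x y - (min x y + 1)).toNat : Nat) : Int)) = max x y from by omega]
      simp
  have hsize : (pvJumpLoop (fun col => (r, col)) (min x y + 1) (max x y - (min x y + 1)).toNat #[]).size
      = ((PySem.List.pyRange (min x y + 1) (max x y) 1).map (fun c => (r, c))).length := by
    rw [← Array.length_toList, hlist]
  unfold get_jump_path_squares_py
  simp only [beq_self_eq_true, if_true, hsize, hlist]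

-- A with distinct rows: the vertical branch as a range map plus the length gate (to_col unused by A here).
lemma A_eval_v (x c y d : Int) (h : x ≠ y) :
    get_jump_path_squares_py x c y d
      = (if ((PySem.List.pyRange (min x y + 1) (max x y) 1).map (fun row => (row, c))).length ≠ 3 then []
         else (PySem.List.pyRange (min x y + 1) (max x y) 1).map (fun row => (row, c))) := by
  have hlist : (pvJumpLoop (fun row => (row, c)) (min x y + 1) (max x y - (min x y + 1)).toNat #[]).toList
      = (PySem.List.pyRange (min x y + 1) (max x y) 1).map (fun row => (row, c)) := by
    rw [pvJumpLoop_toList]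
    rw [show ((min x y + 1) + (((max x y - (min x y + 1)).toNat : Nat) : Int)) = max x y from by omega]
    simp
  have hsize : (pvJumpLoop (fun row => (row, c)) (min x y + 1) (max x y - (min x y + 1)).toNat #[]).size
      = ((PySem.List.pyRange (min x y + 1) (max x y) 1).map (fun row => (row, c))).length := by
    rw [← Array.length_toList, hlist]
  unfold get_jump_path_squares_py
  rw [show (x == y) = false from by simp [h]]
  simp only [Bool.false_eq_true, if_false, hsize, hlist]

-- B's walk with target bc = c + n and exact fuel collects the n in-between columns (row fixed).
lemma pvWalk_h (br : Int) : ∀ (n : Nat) (c : Int) (acc : Array (Int × Int)),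
    (pvWalk 0 1 br (c + n) br c (n + 1) acc).toList
      = acc.toList ++ (PySem.List.pyRange c (c + n) 1).map (fun x => (br, x)) := by
  intro n
  induction n with
  | zero =>
    intro c acc
    rw [pvWalk, if_pos ⟨rfl, by push_cast; ring⟩,
        PySem.List.pyRange_one_eq_nil (by omega)]
    simp
  | succ n ih =>
    intro c acc
    have hc : c + (((n : Nat) + 1 : Nat) : Int) = (c + 1) + ((n : Nat) : Int) := by push_cast; ring
    rw [pvWalk, if_neg (by push_cast; rintro ⟨-, h⟩; omega)]
    simp only [add_zero]
    rw [hc, ih (c + 1)]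
    conv_rhs => rw [PySem.List.pyRange_one_cons (show c < c + 1 + (n : Int) from by omega)]
    simp

-- B's walk with target br = r + n and exact fuel collects the n in-between rows (column fixed).
lemma pvWalk_v (bc : Int) : ∀ (n : Nat) (r : Int) (acc : Array (Int × Int)),
    (pvWalk 1 0 (r + n) bc r bc (n + 1) acc).toList
      = acc.toList ++ (PySem.List.pyRange r (r + n) 1).map (fun x => (x, bc)) := by
  intro n
  induction n with
  | zero =>
    intro r acc
    rw [pvWalk, if_pos ⟨by push_cast; ring, rfl⟩,
        PySem.List.pyRange_one_eq_nil (by omega)]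
    simp
  | succ n ih =>
    intro r acc
    have hc : r + (((n : Nat) + 1 : Nat) : Int) = (r + 1) + ((n : Nat) : Int) := by push_cast; ring
    rw [pvWalk, if_neg (by push_cast; rintro ⟨h, -⟩; omega)]
    simp only [add_zero]
    rw [hc, ih (r + 1)]
    conv_rhs => rw [PySem.List.pyRange_one_cons (show r < r + 1 + (n : Int) from by omega)]
    simp

-- B's post-swap core in the horizontal case, as the same range map with B's length gate.
lemma walk_core_h (r lo hi : Int) (h : lo ≤ hi) :
    (if ((pvWalk (pvSign (r - r)) (pvSign (hi - lo)) r hi (r + pvSign (r - r)) (lo + pvSign (hi - lo))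
          ((r - r).natAbs + (hi - lo).natAbs) #[]).toList).length == 3
     then (pvWalk (pvSign (r - r)) (pvSign (hi - lo)) r hi (r + pvSign (r - r)) (lo + pvSign (hi - lo))
          ((r - r).natAbs + (hi - lo).natAbs) #[]).toList
     else [])
    = (if ((PySem.List.pyRange (lo + 1) hi 1).map (fun c => (r, c))).length == 3
       then (PySem.List.pyRange (lo + 1) hi 1).map (fun c => (r, c)) else []) := by
  have hs0 : pvSign (r - r) = 0 := by simp [pvSign]
  rcases eq_or_lt_of_le h with h | h
  · subst h
    rw [hs0]
    rw [show pvSign (lo - lo) = 0 from by simp [pvSign]]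
    rw [show (lo - lo).natAbs = 0 from by omega, show (r - r).natAbs = 0 from by omega]
    rw [PySem.List.pyRange_one_eq_nil (by omega)]
    simp [pvWalk]
  · have hs1 : pvSign (hi - lo) = 1 := by simp [pvSign]; omega
    have key := pvWalk_h r ((hi - (lo + 1)).toNat) (lo + 1) #[]
    rw [show (lo + 1) + (((hi - (lo + 1)).toNat : Nat) : Int) = hi from by omega] at key
    simp only [List.nil_append] at key
    rw [hs0, hs1, add_zero,
        show (r - r).natAbs + (hi - lo).natAbs = (hi - (lo + 1)).toNat + 1 from by omega, key]

-- B's post-swap core in the vertical case.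
lemma walk_core_v (c lo hi : Int) (h : lo < hi) :
    (if ((pvWalk (pvSign (hi - lo)) (pvSign (c - c)) hi c (lo + pvSign (hi - lo)) (c + pvSign (c - c))
          ((hi - lo).natAbs + (c - c).natAbs) #[]).toList).length == 3
     then (pvWalk (pvSign (hi - lo)) (pvSign (c - c)) hi c (lo + pvSign (hi - lo)) (c + pvSign (c - c))
          ((hi - lo).natAbs + (c - c).natAbs) #[]).toList
     else [])
    = (if ((PySem.List.pyRange (lo + 1) hi 1).map (fun row => (row, c))).length == 3
       then (PySem.List.pyRange (lo + 1) hi 1).map (fun row => (row, c)) else []) := by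
  have hs0 : pvSign (c - c) = 0 := by simp [pvSign]
  have hs1 : pvSign (hi - lo) = 1 := by simp [pvSign]; omega
  have key := pvWalk_v c ((hi - (lo + 1)).toNat) (lo + 1) #[]
  rw [show (lo + 1) + (((hi - (lo + 1)).toNat : Nat) : Int) = hi from by omega] at key
  simp only [List.nil_append] at key
  rw [hs0, hs1, add_zero,
      show (hi - lo).natAbs + (c - c).natAbs = (hi - (lo + 1)).toNat + 1 from by omega, key]

-- On a diagonal pair B returns [] (the straightness guard fires).
lemma alt_diag (fr fc tr tc : Int) (hr : fr ≠ tr) (hc : fc ≠ tc) :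
    get_jump_path_squares_py_alt fr fc tr tc = [] := by
  by_cases hswap : tr < fr ∨ (tr = fr ∧ tc < fc)
  · simp only [get_jump_path_squares_py_alt, if_pos hswap]
    rw [if_pos ⟨by simp [pvSign]; omega, by simp [pvSign]; omega⟩]
  · simp only [get_jump_path_squares_py_alt, if_neg hswap]
    rw [if_pos ⟨by simp [pvSign]; omega, by simp [pvSign]; omega⟩]

-- Both length gates produce the same value.
lemma gate_eq (L : List (Int × Int)) :
    (if L.length ≠ 3 then [] else L) = (if L.length == 3 then L else []) := by
  by_cases h : L.length = 3 <;> simp [h]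

-- B on a horizontal pair, evaluated through the swap and the walk.
lemma alt_eval_h (r x y : Int) :
    get_jump_path_squares_py_alt r x r y
      = (if ((PySem.List.pyRange (min x y + 1) (max x y) 1).map (fun c => (r, c))).length == 3
         then (PySem.List.pyRange (min x y + 1) (max x y) 1).map (fun c => (r, c)) else []) := by
  by_cases hyx : y < x
  · simp only [get_jump_path_squares_py_alt, lt_irrefl, true_and, false_or, if_pos hyx]
    rw [if_neg (show ¬(pvSign (r - r) ≠ 0 ∧ pvSign (x - y) ≠ 0) from by simp [pvSign])]
    rw [show min x y = y from min_eq_right (le_of_lt hyx),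
        show max x y = x from max_eq_left (le_of_lt hyx)]
    exact walk_core_h r y x (le_of_lt hyx)
  · simp only [get_jump_path_squares_py_alt, lt_irrefl, true_and, false_or, if_neg hyx]
    rw [if_neg (show ¬(pvSign (r - r) ≠ 0 ∧ pvSign (y - x) ≠ 0) from by simp [pvSign])]
    rw [show min x y = x from min_eq_left ((not_lt.mp hyx)),
        show max x y = y from max_eq_right ((not_lt.mp hyx))]
    exact walk_core_h r x y ((not_lt.mp hyx))

-- B on a vertical pair (distinct rows, equal columns).
lemma alt_eval_v (x c y : Int) (h : x ≠ y) :
    get_jump_path_squares_py_alt x c y c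
      = (if ((PySem.List.pyRange (min x y + 1) (max x y) 1).map (fun row => (row, c))).length == 3
         then (PySem.List.pyRange (min x y + 1) (max x y) 1).map (fun row => (row, c)) else []) := by
  by_cases hyx : y < x
  · simp only [get_jump_path_squares_py_alt, lt_irrefl, and_false, or_false, if_pos hyx]
    rw [if_neg (show ¬(pvSign (x - y) ≠ 0 ∧ pvSign (c - c) ≠ 0) from by simp [pvSign])]
    rw [show min x y = y from min_eq_right (le_of_lt hyx),
        show max x y = x from max_eq_left (le_of_lt hyx)]
    exact walk_core_v c y x hyx
  · have hxy : x < y := lt_of_le_of_ne ((not_lt.mp hyx)) h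
    simp only [get_jump_path_squares_py_alt, lt_irrefl, and_false, or_false, if_neg hyx]
    rw [if_neg (show ¬(pvSign (y - x) ≠ 0 ∧ pvSign (c - c) ≠ 0) from by simp [pvSign])]
    rw [show min x y = x from min_eq_left (le_of_lt hxy),
        show max x y = y from max_eq_right (le_of_lt hxy)]
    exact walk_core_v c x y hxy

-- Inside D_ A returns a three-element list.
lemma A_diag_len (fr fc tr tc : Int) (hr : fr ≠ tr) (hspan : (tr - fr).natAbs = 4) :
    (get_jump_path_squares_py fr fc tr tc).length = 3 := by
  rw [A_eval_v fr fc tr tc hr]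
  rw [if_neg (by simp [PySem.List.length_pyRange_one]; omega)]
  simp [PySem.List.length_pyRange_one]
  omega

-- ===== VERDICT (by name: the statement is the Claim_ definition above) =====
theorem get_jump_path_squares_py_spec : Claim_unchanged_get_jump_path_squares_py := by
  intro fr fc tr tc _ hD
  by_cases hrow : fr = tr
  · subst hrow
    rw [A_eval_h fr fc tc, alt_eval_h fr fc tc, gate_eq]
  · by_cases hcol : fc = tc
    · subst hcol
      rw [A_eval_v fr fc tr fc hrow, alt_eval_v fr fc tr hrow, gate_eq]
    · have hspan : (tr - fr).natAbs ≠ 4 := fun h4 => hD ⟨hrow, hcol, h4⟩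
      rw [alt_diag fr fc tr tc hrow hcol, A_eval_v fr fc tr tc hrow]
      rw [if_pos ?_]
      simp only [PySem.List.length_pyRange_one, List.length_map]
      omega

theorem get_jump_path_squares_py_changed : Claim_changed_get_jump_path_squares_py := by
  unfold Claim_changed_get_jump_path_squares_py; decide

theorem get_jump_path_squares_py_tight : Claim_exact_get_jump_path_squares_py := by
  intro fr fc tr tc _ hD
  obtain ⟨hr, hc, hspan⟩ := hD
  rw [alt_diag fr fc tr tc hr hc]
  intro h
  have := A_diag_len fr fc tr tc hr hspan
  rw [h] at this
  simp at this
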